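-- pv_equiv track=rewrite | github.com/zweistein1326/algoholics-anonymous | 01/main.py | is_valid_solution
-- ===== SOURCE A (Python) =====
-- def is_valid_solution(board):
--     # Check if there are 8 queens on the board
--     if sum(row.count(1) for row in board) != 8:
--         return False
--
--     # Check rows and columns
--     for i in range(8):
--         if sum(board[i]) != 1 or sum(row[i] for row in board) != 1:
--             return False
--
--     # Check diagonals
--     for i in range(8):
--         for j in range(8):
--             if board[i][j] == 1:
--                 # Check upper-left diagonal
--                 for k in range(1, min(i, j) + 1):
--                     if board[i - k][j - k] == 1:
--                         return False
--                 # Check upper-right diagonal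
--                 for k in range(1, min(i, 7 - j) + 1):
--                     if board[i - k][j + k] == 1:
--                         return False
--                 # Check lower-left diagonal
--                 for k in range(1, min(7 - i, j) + 1):
--                     if board[i + k][j - k] == 1:
--                         return False
--                 # Check lower-right diagonal
--                 for k in range(1, min(7 - i, 7 - j) + 1):
--                     if board[i + k][j + k] == 1:
--                         return False
--     return True
-- ===== SOURCE B (Python) =====
-- def is_valid_solution(board):
--     # Total number of queens must be 8
--     if sum(row.count(1) for row in board) != 8:
--         return False
--
--     # Each row and each column must sum to exactly 1
--     for i in range(8):
--         if sum(board[i]) != 1 or sum(row[i] for row in board) != 1: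
--             return False
--
--     # One pass: collect queen coordinates, then compare diagonal-index set sizes
--     queens = [(i, j) for i, row in enumerate(board) for j, v in enumerate(row) if v == 1]
--     sums = {i + j for i, j in queens}
--     diffs = {i - j for i, j in queens}
--     return len(sums) == len(queens) and len(diffs) == len(queens)
-- ===== Notes on version B (the rewrite author's own statement) =====
-- stated objective: idiomatic
-- what changed: The per-queen four-direction k-step diagonal scans are replaced by one pass that collects queen coordinates and compares the sizes of the sets of diagonal indices i+j and i-j with the number of queens; the three sum/count guards are kept verbatim.
import Mathlib
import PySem

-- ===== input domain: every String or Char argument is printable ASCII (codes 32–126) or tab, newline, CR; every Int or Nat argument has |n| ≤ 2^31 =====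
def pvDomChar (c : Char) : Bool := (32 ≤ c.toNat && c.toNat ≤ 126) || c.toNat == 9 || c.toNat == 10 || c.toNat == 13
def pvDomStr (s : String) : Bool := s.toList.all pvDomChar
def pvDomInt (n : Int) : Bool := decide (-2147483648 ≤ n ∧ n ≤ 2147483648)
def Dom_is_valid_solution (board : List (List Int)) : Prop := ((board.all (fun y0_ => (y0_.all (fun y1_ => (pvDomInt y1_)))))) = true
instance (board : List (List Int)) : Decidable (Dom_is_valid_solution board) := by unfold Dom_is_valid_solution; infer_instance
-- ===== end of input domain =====

-- B replaces A's four-direction k-step diagonal scans by one pass collecting queen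
-- coordinates and comparing diagonal-index set sizes (idiomatic; guards kept verbatim).


-- ===== PORT A =====
-- shared guard helpers: these three checks appear verbatim in both Source A and Source B
def pvTotalOnes (board : List (List Int)) : Nat :=
  (board.map (fun row => row.count 1)).sum
def pvGuard (board : List (List Int)) : Bool :=
  (List.range 8).all (fun i =>
    decide ((board.getD i []).sum = 1) &&
    decide ((board.map (fun row => row.getD i 0)).sum = 1))
-- board[i][j] for the in-range nonnegative indices the guarded code reaches (exact there)
def pvCell (board : List (List Int)) (i j : Nat) : Int := (board.getD i []).getD j 0

def is_valid_solution (board : List (List Int)) : Bool :=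
  if pvTotalOnes board ≠ 8 then false
  else if ¬ pvGuard board then false
  else
    (List.range 8).all (fun i => (List.range 8).all (fun j =>
      if pvCell board i j = 1 then
        ((List.range (min i j)).all fun k => !decide (pvCell board (i - (k+1)) (j - (k+1)) = 1)) &&
        ((List.range (min i (7 - j))).all fun k => !decide (pvCell board (i - (k+1)) (j + (k+1)) = 1)) &&
        ((List.range (min (7 - i) j)).all fun k => !decide (pvCell board (i + (k+1)) (j - (k+1)) = 1)) &&
        ((List.range (min (7 - i) (7 - j))).all fun k => !decide (pvCell board (i + (k+1)) (j + (k+1)) = 1))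
      else true))

-- ===== PORT B =====
def pvQueens (board : List (List Int)) : List (Int × Int) :=
  (PySem.List.enumerate board).flatMap (fun p =>
    (PySem.List.enumerate p.2).filterMap (fun q => if q.2 = 1 then some (p.1, q.1) else none))

def is_valid_solution_alt (board : List (List Int)) : Bool :=
  if pvTotalOnes board ≠ 8 then false
  else if ¬ pvGuard board then false
  else
    let queens := pvQueens board
    let sums := PySem.Set.ofList (queens.map (fun p => p.1 + p.2))
    let diffs := PySem.Set.ofList (queens.map (fun p => p.1 - p.2))
    decide (sums.length = queens.length) && decide (diffs.length = queens.length)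

-- ===== PRECONDITION & SPEC =====
-- Pre_ restricts to the natural domain: 8×8 boards, plus any board the global 1-count guard
-- already rejects; a non-8×8 board with exactly eight 1s usually makes A raise IndexError, and
-- when A does return there its value ignores every cell outside its hard-coded 8×8 window.
def Pre_is_valid_solution (board : List (List Int)) : Prop :=
  pvTotalOnes board ≠ 8 ∨ (board.length = 8 ∧ ∀ row ∈ board, row.length = 8)
instance (board : List (List Int)) : Decidable (Pre_is_valid_solution board) := by
  unfold Pre_is_valid_solution; infer_instance
def pvWitness_is_valid_solution : List (List Int) :=
  [[1,0,0,0,0,0,0,0],[0,0,0,0,1,0,0,0],[0,0,0,0,0,0,0,1],[0,0,0,0,0,1,0,0],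
   [0,0,1,0,0,0,0,0],[0,0,0,0,0,0,1,0],[0,1,0,0,0,0,0,0],[0,0,0,1,0,0,0,0]]

def Spec_is_valid_solution (board : List (List Int)) (out : Bool) : Prop := out = is_valid_solution_alt board
instance (board : List (List Int)) (out : Bool) : Decidable (Spec_is_valid_solution board out) := by unfold Spec_is_valid_solution; infer_instance

-- ===== CLAIM (what is proved, stated in full; the proofs are below) =====
def Claim_equal_is_valid_solution : Prop := ∀ (board : List (List Int)), Dom_is_valid_solution board → Pre_is_valid_solution board → Spec_is_valid_solution board (is_valid_solution board)

-- ===== LEMMAS AND PROOFS =====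

-- "no two distinct queens share a diagonal" — the common meaning of both diagonal checks
def pvNoAtk (board : List (List Int)) : Prop :=
  ∀ i j i' j' : Nat, i < 8 → j < 8 → i' < 8 → j' < 8 →
    pvCell board i j = 1 → pvCell board i' j' = 1 → (i ≠ i' ∨ j ≠ j') →
    i + j ≠ i' + j' ∧ (i : Int) - j ≠ (i' : Int) - j'


lemma pvDiag_iff_noAtk (board : List (List Int)) :
    ((List.range 8).all (fun i => (List.range 8).all (fun j =>
      if pvCell board i j = 1 then
        ((List.range (min i j)).all fun k => !decide (pvCell board (i - (k+1)) (j - (k+1)) = 1)) &&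
        ((List.range (min i (7 - j))).all fun k => !decide (pvCell board (i - (k+1)) (j + (k+1)) = 1)) &&
        ((List.range (min (7 - i) j)).all fun k => !decide (pvCell board (i + (k+1)) (j - (k+1)) = 1)) &&
        ((List.range (min (7 - i) (7 - j))).all fun k => !decide (pvCell board (i + (k+1)) (j + (k+1)) = 1))
      else true)) = true) ↔ pvNoAtk board := by
  simp only [List.all_eq_true, List.mem_range]
  constructor
  · intro H i j i' j' hi hj hi' hj' hq hq' hne
    have unpack : ∀ a b : Nat, a < 8 → b < 8 → pvCell board a b = 1 →
        (∀ k < min a b, ¬ pvCell board (a - (k+1)) (b - (k+1)) = 1) ∧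
        (∀ k < min a (7 - b), ¬ pvCell board (a - (k+1)) (b + (k+1)) = 1) ∧
        (∀ k < min (7 - a) b, ¬ pvCell board (a + (k+1)) (b - (k+1)) = 1) ∧
        (∀ k < min (7 - a) (7 - b), ¬ pvCell board (a + (k+1)) (b + (k+1)) = 1) := by
      intro a b ha hb hc
      have h := H a ha b hb
      rw [if_pos hc] at h
      simpa only [Bool.and_eq_true, List.all_eq_true, List.mem_range, Bool.not_eq_true',
        decide_eq_false_iff_not, and_assoc] using h
    constructor
    · intro hsum
      rcases Nat.lt_trichotomy i i' with hlt | heq | hgt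
      · -- i < i', j' < j : lower-left from (i,j)
        have h3 := (unpack i j hi hj hq).2.2.1 (i' - i - 1) (by omega)
        have e1 : i + (i' - i - 1 + 1) = i' := by omega
        have e2 : j - (i' - i - 1 + 1) = j' := by omega
        rw [e1, e2] at h3; exact h3 hq'
      · rcases hne with h | h <;> omega
      · have h3 := (unpack i' j' hi' hj' hq').2.2.1 (i - i' - 1) (by omega)
        have e1 : i' + (i - i' - 1 + 1) = i := by omega
        have e2 : j' - (i - i' - 1 + 1) = j := by omega
        rw [e1, e2] at h3; exact h3 hq
    · intro hdiff
      rcases Nat.lt_trichotomy i i' with hlt | heq | hgt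
      · -- i < i', j < j' : lower-right from (i,j)
        have h4 := (unpack i j hi hj hq).2.2.2 (i' - i - 1) (by omega)
        have e1 : i + (i' - i - 1 + 1) = i' := by omega
        have e2 : j + (i' - i - 1 + 1) = j' := by omega
        rw [e1, e2] at h4; exact h4 hq'
      · rcases hne with h | h <;> omega
      · have h4 := (unpack i' j' hi' hj' hq').2.2.2 (i - i' - 1) (by omega)
        have e1 : i' + (i - i' - 1 + 1) = i := by omega
        have e2 : j' + (i - i' - 1 + 1) = j := by omega
        rw [e1, e2] at h4; exact h4 hq
  · intro H i hi j hj
    by_cases hc : pvCell board i j = 1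
    · rw [if_pos hc]
      simp only [Bool.and_eq_true, List.all_eq_true, List.mem_range, Bool.not_eq_true',
        decide_eq_false_iff_not]
      refine ⟨⟨⟨?_, ?_⟩, ?_⟩, ?_⟩ <;> intro k hk hcell
      · exact (H (i - (k+1)) (j - (k+1)) i j (by omega) (by omega) hi hj hcell hc
          (Or.inl (by omega))).2 (by omega)
      · exact (H (i - (k+1)) (j + (k+1)) i j (by omega) (by omega) hi hj hcell hc
          (Or.inl (by omega))).1 (by omega)
      · exact (H (i + (k+1)) (j - (k+1)) i j (by omega) (by omega) hi hj hcell hc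
          (Or.inl (by omega))).1 (by omega)
      · exact (H (i + (k+1)) (j + (k+1)) i j (by omega) (by omega) hi hj hcell hc
          (Or.inl (by omega))).2 (by omega)
    · rw [if_neg hc]

lemma pvFilterMap_mem (i : Int) (row : List Int) (s : Int) (p : Int × Int) :
    p ∈ (PySem.List.enumerate row s).filterMap
        (fun q => if q.2 = 1 then some (i, q.1) else none) ↔
      ∃ k : Nat, ∃ _ : k < row.length, p = (i, s + k) ∧ row[k] = 1 := by
  simp only [List.mem_filterMap, PySem.List.mem_enumerate_iff]
  constructor
  · rintro ⟨⟨a, b⟩, ⟨k, hk, hab⟩, hif⟩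
    obtain ⟨rfl, rfl⟩ := Prod.mk.injEq .. ▸ hab
    by_cases h1 : row[k] = 1
    · refine ⟨k, hk, ?_, h1⟩
      simp only [h1, if_pos] at hif
      exact (Option.some.injEq .. ▸ hif).symm
    · simp [h1] at hif
  · rintro ⟨k, hk, rfl, h1⟩
    exact ⟨(s + k, row[k]), ⟨k, hk, rfl⟩, by simp [h1]⟩

lemma pvQueens_mem (board : List (List Int)) (h1 : board.length = 8)
    (h2 : ∀ row ∈ board, row.length = 8) (p : Int × Int) :
    p ∈ pvQueens board ↔
      ∃ i : Nat, i < 8 ∧ ∃ j : Nat, j < 8 ∧ p = ((i : Int), (j : Int)) ∧ pvCell board i j = 1 := by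
  unfold pvQueens
  simp only [List.mem_flatMap, PySem.List.mem_enumerate_iff]
  constructor
  · rintro ⟨⟨a, row⟩, ⟨i, hi, hpr⟩, hmem⟩
    obtain ⟨rfl, rfl⟩ := Prod.mk.injEq .. ▸ hpr
    rw [pvFilterMap_mem] at hmem
    obtain ⟨j, hj, rfl, hq⟩ := hmem
    replace hj : j < board[i].length := hj
    have hrl : board[i].length = 8 := h2 _ (List.getElem_mem hi)
    refine ⟨i, by omega, j, by omega, by simp, ?_⟩
    unfold pvCell
    rw [List.getD_eq_getElem board [] hi, List.getD_eq_getElem _ 0 (by omega)]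
    exact hq
  · rintro ⟨i, hi, j, hj, rfl, hq⟩
    have hi' : i < board.length := by omega
    have hrl : board[i].length = 8 := h2 _ (List.getElem_mem hi')
    refine ⟨(0 + (i : Nat), board[i]), ⟨i, hi', rfl⟩, ?_⟩
    rw [pvFilterMap_mem]
    refine ⟨j, show j < board[i].length by omega, by simp, ?_⟩
    unfold pvCell at hq
    rw [List.getD_eq_getElem board [] hi', List.getD_eq_getElem _ 0 (by omega)] at hq
    exact hq

lemma pvInner_fst (i : Int) (row : List Int) (s : Int) (p : Int × Int)
    (h : p ∈ (PySem.List.enumerate row s).filterMap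
        (fun q => if q.2 = 1 then some (i, q.1) else none)) : p.1 = i := by
  rw [pvFilterMap_mem] at h
  obtain ⟨k, hk, rfl, -⟩ := h
  rfl

lemma pvQueens_nodup (board : List (List Int)) : (pvQueens board).Nodup := by
  unfold pvQueens
  rw [List.nodup_flatMap]
  constructor
  · intro p hp
    have hpw : ((PySem.List.enumerate p.2 0).filterMap
        (fun q => if q.2 = 1 then some (p.1, q.1) else none)).Pairwise
        (fun a b : Int × Int => a.2 < b.2) := by
      rw [List.pairwise_filterMap]
      refine (PySem.List.pairwise_lt_enumerate p.2 0).imp ?_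
      intro a b hab x hx y hy
      split at hx
      · split at hy
        · rw [Option.some.injEq] at hx hy
          subst hx; subst hy; exact hab
        · simp at hy
      · simp at hx
    exact hpw.imp (fun h => by intro he; rw [he] at h; exact lt_irrefl _ h)
  · refine (PySem.List.pairwise_lt_enumerate board 0).imp ?_
    intro a b hab x hx hy
    have h1 := pvInner_fst a.1 a.2 0 x hx
    have h2 := pvInner_fst b.1 b.2 0 x hy
    omega

lemma pvOfList_length_eq_iff {α : Type} [BEq α] [LawfulBEq α] (l : List α) :
    (PySem.Set.ofList l).length = l.length ↔ l.Nodup := by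
  constructor
  · intro h
    induction l with
    | nil => exact List.nodup_nil
    | cons x xs ih =>
      rw [PySem.Set.ofList_cons] at h
      by_cases hx : x ∈ xs
      · exfalso
        have hmem : x ∈ PySem.Set.ofList xs := (PySem.Set.mem_ofList xs x).mpr hx
        have hlt : (PySem.Set.discard (PySem.Set.ofList xs) x).length < (PySem.Set.ofList xs).length := by
          unfold PySem.Set.discard
          rw [List.length_filter_lt_length_iff_exists]
          exact ⟨x, hmem, by simp⟩
        have hle := PySem.Set.length_ofList_le xs
        simp only [List.length_cons] at h
        omega
      · have hd : PySem.Set.discard (PySem.Set.ofList xs) x = PySem.Set.ofList xs := by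
          unfold PySem.Set.discard
          rw [List.filter_eq_self]
          intro a ha
          have haa : a ∈ xs := (PySem.Set.mem_ofList xs a).mp ha
          simp only [Bool.not_eq_eq_eq_not, Bool.not_true, beq_eq_false_iff_ne]
          exact fun he => hx (he ▸ haa)
        rw [hd] at h
        simp only [List.length_cons] at h
        exact List.Nodup.cons hx (ih (by omega))
  · intro h
    rw [PySem.Set.ofList_eq_self_of_nodup l h]

lemma pvAlt_iff_noAtk (board : List (List Int)) (h1 : board.length = 8)
    (h2 : ∀ row ∈ board, row.length = 8) :
    ((PySem.Set.ofList ((pvQueens board).map (fun p => p.1 + p.2))).length = (pvQueens board).length ∧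
     (PySem.Set.ofList ((pvQueens board).map (fun p => p.1 - p.2))).length = (pvQueens board).length)
    ↔ pvNoAtk board := by
  have hq := pvQueens_nodup board
  have hm := pvQueens_mem board h1 h2
  have key : ∀ f : Int × Int → Int,
      ((PySem.Set.ofList ((pvQueens board).map f)).length = (pvQueens board).length ↔
       ∀ x ∈ pvQueens board, ∀ y ∈ pvQueens board, f x = f y → x = y) := by
    intro f
    rw [show (pvQueens board).length = ((pvQueens board).map f).length from
      (List.length_map (f := f) (as := pvQueens board)).symm, pvOfList_length_eq_iff,
      List.nodup_map_iff_inj_on hq]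
  rw [key, key]
  constructor
  · rintro ⟨hs, hd⟩ i j i' j' hi hj hi' hj' hq1 hq2 hne
    constructor
    · intro hsum
      have hx := (hm ((i : Int), (j : Int))).mpr ⟨i, hi, j, hj, rfl, hq1⟩
      have hy := (hm ((i' : Int), (j' : Int))).mpr ⟨i', hi', j', hj', rfl, hq2⟩
      have := hs _ hx _ hy (by push_cast; omega)
      rw [Prod.mk.injEq] at this
      rcases hne with h | h <;> omega
    · intro hdiff
      have hx := (hm ((i : Int), (j : Int))).mpr ⟨i, hi, j, hj, rfl, hq1⟩
      have hy := (hm ((i' : Int), (j' : Int))).mpr ⟨i', hi', j', hj', rfl, hq2⟩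
      have := hd _ hx _ hy (by push_cast; omega)
      rw [Prod.mk.injEq] at this
      rcases hne with h | h <;> omega
  · intro H
    refine ⟨?_, ?_⟩ <;> intro x hx y hy hf <;>
      obtain ⟨i, hi, j, hj, rfl, hc⟩ := (hm x).mp hx <;>
      obtain ⟨i', hi', j', hj', rfl, hc'⟩ := (hm y).mp hy <;>
      by_cases hij : i = i' ∧ j = j'
    · rw [hij.1, hij.2]
    · exact absurd (by omega : i + j = i' + j')
        ((H i j i' j' hi hj hi' hj' hc hc' (by tauto)).1)
    · rw [hij.1, hij.2]
    · exact absurd (by omega : (i : Int) - j = (i' : Int) - j')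
        ((H i j i' j' hi hj hi' hj' hc hc' (by tauto)).2)

-- ===== VERDICT (by name: the statement is the Claim_ definition above) =====
theorem is_valid_solution_spec : Claim_equal_is_valid_solution := by
  intro board _ hpre
  unfold Spec_is_valid_solution is_valid_solution is_valid_solution_alt
  by_cases h8 : pvTotalOnes board ≠ 8
  · simp [h8]
  · rcases hpre with hpre | ⟨h1, h2⟩
    · exact absurd hpre h8
    simp only [h8, if_false]
    by_cases hg : pvGuard board
    · simp only [hg, not_true, if_false]
      rw [Bool.eq_iff_iff]
      simp only [Bool.and_eq_true, decide_eq_true_eq]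
      exact (pvDiag_iff_noAtk board).trans (pvAlt_iff_noAtk board h1 h2).symm
    · simp [hg]
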